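-- pv_equiv track=rewrite | github.com/kirihar2/coding-competition | kthdistinctelement.py | solve
-- ===== SOURCE A (Python) =====
-- def solve(arr,k):
--     d = set()
--     for i in arr:
--         if i not in d:
--             d.add(i)
--         if len(d) == k:
--             return i
--     return -1
-- ===== SOURCE B (Python) =====
-- def solve(arr, k):
--     # quotient iteration: the head is the 1st distinct value; repeatedly
--     # strip the head's occurrences from the tail, decrementing k
--     while True:
--         if k <= 0 or not arr:
--             return -1
--         h = arr[0]
--         if k == 1:
--             return h
--         arr = [x for x in arr[1:] if x != h]
--         k -= 1
-- ===== Notes on version B (the rewrite author's own statement) =====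
-- stated objective: alternative
-- what changed: Replaces the single-pass scan with a running distinct-set by a quotient recursion: the head is the 1st distinct value, so for k>1 filter every occurrence of the head out of the tail and recurse with k-1; no set or dedup list is ever maintained.
import Mathlib
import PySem

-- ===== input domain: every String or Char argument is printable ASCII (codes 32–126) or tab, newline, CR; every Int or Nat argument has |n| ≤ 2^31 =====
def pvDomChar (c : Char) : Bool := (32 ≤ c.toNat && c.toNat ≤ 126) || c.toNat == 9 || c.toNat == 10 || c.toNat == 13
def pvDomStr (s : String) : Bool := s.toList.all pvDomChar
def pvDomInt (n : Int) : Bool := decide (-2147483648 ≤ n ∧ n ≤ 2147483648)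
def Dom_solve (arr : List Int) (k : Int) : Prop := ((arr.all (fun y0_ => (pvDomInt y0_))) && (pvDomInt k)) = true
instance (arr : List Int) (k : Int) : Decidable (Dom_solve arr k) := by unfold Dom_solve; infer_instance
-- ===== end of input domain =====

-- B answers by quotient recursion (head is the 1st distinct; for k>1 filter the head out of the tail and recurse with k-1), proved equal to A's early-exit set scan.


-- ===== PORT A =====
-- the for-loop with its early return, carrying the running set d
def solveLoop (k : Int) (d : PySem.Set Int) : List Int → Int
  | [] => -1
  | i :: rest =>
      let d' := if PySem.Set.contains d i then d else PySem.Set.add d i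
      if (d'.length : Int) = k then i else solveLoop k d' rest

def solve (arr : List Int) (k : Int) : Int := solveLoop k PySem.Set.empty arr

-- ===== PORT B =====
-- B's recursion: if k ≤ 0 or arr empty return -1; the head is the 1st distinct value,
-- so for k = 1 return it, else drop every occurrence of the head and recurse with k-1.
def solve_alt (arr : List Int) (k : Int) : Int :=
  if k ≤ 0 then -1
  else
    match arr with
    | [] => -1
    | h :: t =>
        if k = 1 then h
        else solve_alt (t.filter (fun x => x ≠ h)) (k - 1)
termination_by arr.length
decreasing_by
  simp only [List.length_cons, List.length_unattach]
  exact Nat.lt_succ_of_le ((List.length_filter_le _ _).trans (by simp))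

-- ===== PRECONDITION & SPEC =====
def Spec_solve (arr : List Int) (k : Int) (out : Int) : Prop := out = solve_alt arr k
instance (arr : List Int) (k : Int) (out : Int) : Decidable (Spec_solve arr k out) := by unfold Spec_solve; infer_instance

-- ===== CLAIM (what is proved, stated in full; the proofs are below) =====
def Claim_equal_solve : Prop := ∀ (arr : List Int) (k : Int), Dom_solve arr k → Spec_solve arr k (solve arr k)

-- ===== LEMMAS AND PROOFS =====
-- both programs compute 'pick' of the distinct list (first-occurrence order)
def pick (u : List Int) (k : Int) : Int :=
  if 0 < k ∧ k ≤ (u.length : Int) then (PySem.List.pyGet? u (k - 1)).getD (-1) else -1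

-- dedup commutes with filtering out a value
theorem ofList_filter_ne (t : List Int) (h : Int) :
    PySem.Set.ofList (t.filter (fun x => x ≠ h)) =
      PySem.Set.discard (PySem.Set.ofList t) h := by
  induction t with
  | nil => rfl
  | cons a t ih =>
      by_cases ha : a = h
      · subst ha
        have : (a :: t).filter (fun x => x ≠ a) = t.filter (fun x => x ≠ a) := by
          simp [List.filter]
        rw [this, ih, PySem.Set.ofList_cons]
        simp [PySem.Set.discard, List.filter_filter]
      · have : (a :: t).filter (fun x => x ≠ h) = a :: t.filter (fun x => x ≠ h) := by
          simp [List.filter, ha]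
        rw [this, PySem.Set.ofList_cons, ih, PySem.Set.ofList_cons]
        simp only [PySem.Set.discard, List.filter_cons, List.filter_filter]
        simp [ha, Bool.and_comm]

-- pick steps over the head for k > 1
theorem pick_cons (h : Int) (u : List Int) (k : Int) (hk : 1 < k) :
    pick (h :: u) k = pick u (k - 1) := by
  unfold pick
  have h1 : 0 ≤ k - 1 := by omega
  by_cases hle : k ≤ (u.length : Int) + 1
  · rw [if_pos ⟨by omega, by simpa using hle⟩]
    by_cases hle' : k - 1 ≤ (u.length : Int)
    · rw [if_pos ⟨by omega, hle'⟩]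
      rw [PySem.List.pyGet?_of_nonneg _ h1, PySem.List.pyGet?_of_nonneg _ (by omega)]
      have : (k - 1).toNat = (k - 1 - 1).toNat + 1 := by omega
      rw [this]
      simp
    · omega
  · rw [if_neg (by simp; omega), if_neg (by omega)]

-- B computes pick of the dedup
theorem solve_alt_eq_pick (n : Nat) (arr : List Int) (k : Int) (hn : arr.length ≤ n) :
    solve_alt arr k = pick (PySem.Set.ofList arr) k := by
  induction n generalizing arr k with
  | zero =>
      have : arr = [] := List.eq_nil_of_length_eq_zero (Nat.le_zero.mp hn)
      subst this
      rw [solve_alt]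
      unfold pick
      simp [PySem.Set.ofList_nil]
  | succ n ih =>
      match arr with
      | [] =>
          rw [solve_alt]
          unfold pick
          simp [PySem.Set.ofList_nil]
      | h :: t =>
          rw [solve_alt]
          by_cases hk0 : k ≤ 0
          · rw [if_pos hk0]
            unfold pick
            rw [if_neg (by omega)]
          · rw [if_neg hk0]
            by_cases hk1 : k = 1
            · subst hk1
              rw [PySem.Set.ofList_cons]
              unfold pick
              have hc : (0:Int) < 1 ∧ (1:Int) ≤ (((h :: PySem.Set.discard (PySem.Set.ofList t) h).length : Nat) : Int) := ⟨by omega, by simp⟩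
              rw [if_pos hc]
              simp
            · rw [if_neg hk1]
              have hlen : (t.filter (fun x => x ≠ h)).length ≤ n := by
                have := List.length_filter_le (fun x => decide (x ≠ h)) t
                simp at hn; omega
              rw [ih _ _ hlen, ofList_filter_ne, PySem.Set.ofList_cons,
                pick_cons h _ k (by omega)]

-- A's loop computes pick of the dedup (invariant over the carried set d)
theorem solveLoop_eq_pick (k : Int) (arr : List Int) (d : PySem.Set Int)
    (h : k ≤ 0 ∨ (d.length : Int) < k) :
    solveLoop k d arr = pick (PySem.Set.update d arr) k := by
  induction arr generalizing d with
  | nil =>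
      simp only [solveLoop, PySem.Set.update_nil, pick]
      rw [if_neg (by omega)]
  | cons i rest ih =>
      rw [PySem.Set.update_cons]
      by_cases hc : PySem.Set.contains d i = true
      · have hm : i ∈ d := by simpa [PySem.Set.contains] using hc
        have hadd : PySem.Set.add d i = d := by simp [PySem.Set.add, hm]
        have hd : d ≠ [] := by rintro rfl; simp at hm
        have hlen : 0 < d.length := List.length_pos_of_ne_nil hd
        simp only [solveLoop, hc, if_true, hadd]
        rw [if_neg (by omega)]
        exact ih d h
      · have hm : i ∉ d := by simpa [PySem.Set.contains] using hc
        have hadd : PySem.Set.add d i = d ++ [i] := by simp [PySem.Set.add, hm]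
        simp only [solveLoop, hc, Bool.false_eq_true, ite_false, hadd]
        by_cases hk : (((d ++ [i]).length : Int) = k)
        · rw [if_pos hk]
          rw [PySem.Set.update_eq_append_filter]
          have hlen : (d.length : Int) + 1 = k := by simpa using hk
          simp only [pick, List.append_assoc, List.singleton_append]
          rw [if_pos ⟨by omega, by simp; omega⟩]
          have hkd : k - 1 = (d.length : Int) := by omega
          rw [hkd, PySem.List.pyGet?_append_length]
          rfl
        · rw [if_neg hk]
          refine ih (d ++ [i]) ?_
          rcases h with h | h
          · exact Or.inl h
          · right; simp at hk ⊢; omega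

-- ===== VERDICT (by name: the statement is the Claim_ definition above) =====
theorem solve_spec : Claim_equal_solve := by
  intro arr k _
  unfold Spec_solve solve
  rw [solveLoop_eq_pick k arr PySem.Set.empty (by simp [PySem.Set.empty]; omega),
    solve_alt_eq_pick arr.length arr k le_rfl, ← PySem.Set.update_empty]
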